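-- pv_equiv track=rewrite | github.com/hanjoondev/zb-study | unknown/U240711.py | solution
-- ===== SOURCE A (Python) =====
-- def solution(s):
--     if not s:
--         return None
--     length = len(s)
--     left, right = 0, length - 1
--     while left < right and (c := s[left]) == s[right]:
--         while left <= right and s[left] == c:
--             left += 1
--         while left <= right and s[right] == c:
--             right -= 1
--     return s[left:right + 1] if right >= left else None
-- ===== SOURCE B (Python) =====
-- def solution(s):
--     if not s:
--         return None
--     # build a run-length encoding of s
--     runs = []
--     for ch in s:
--         if runs and runs[-1][0] == ch:
--             runs[-1] = (ch, runs[-1][1] + 1)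
--         else:
--             runs.append((ch, 1))
--     # two pointers over the runs: pair off equal-char end runs
--     i, j = 0, len(runs) - 1
--     while i < j and runs[i][0] == runs[j][0]:
--         i += 1
--         j -= 1
--     if i > j:
--         return None
--     if i == j:
--         return runs[i][0] if runs[i][1] == 1 else None
--     return "".join(ch * n for ch, n in runs[i:j + 1])
-- ===== Notes on version B (the rewrite author's own statement) =====
-- stated objective: alternative
-- what changed: B first builds a run-length encoding of the string and then pairs off equal-character end runs with a two-pointer over the run table, instead of A's nested index-advancing while loops over characters.
import Mathlib
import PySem

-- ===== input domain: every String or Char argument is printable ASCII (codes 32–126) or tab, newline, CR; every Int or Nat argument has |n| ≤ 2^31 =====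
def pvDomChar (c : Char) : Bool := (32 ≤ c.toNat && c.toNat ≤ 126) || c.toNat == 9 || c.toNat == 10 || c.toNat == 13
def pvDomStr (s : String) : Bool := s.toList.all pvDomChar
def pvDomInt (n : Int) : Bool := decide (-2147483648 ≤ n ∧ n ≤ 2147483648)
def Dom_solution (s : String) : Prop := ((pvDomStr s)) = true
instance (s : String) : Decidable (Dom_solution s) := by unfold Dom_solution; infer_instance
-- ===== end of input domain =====

-- B replaces A's nested index-advancing while loops by a run-length encoding of the string
-- plus a two-pointer pass over the run table (objective: alternative algorithm, same cost).

-- ===== PORT A =====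
-- Loops are ported with an explicit fuel counter (a pure totality guard: the callers
-- always pass enough fuel, so each loop runs exactly as its Python while loop does).

-- inner while: while left <= right and s[left] == c: left += 1
def pvALeft (l : List Char) (c : Char) (right : Int) : Nat → Int → Int
  | 0, left => left
  | fuel + 1, left =>
    if left ≤ right ∧ PySem.List.pyGet? l left = some c then
      pvALeft l c right fuel (left + 1)
    else left

-- inner while: while left <= right and s[right] == c: right -= 1
def pvARight (l : List Char) (c : Char) (left : Int) : Nat → Int → Int
  | 0, right => right
  | fuel + 1, right =>
    if left ≤ right ∧ PySem.List.pyGet? l right = some c then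
      pvARight l c left fuel (right - 1)
    else right

-- outer while: while left < right and (c := s[left]) == s[right]: …
def pvAOuter (l : List Char) : Nat → Int → Int → Int × Int
  | 0, left, right => (left, right)
  | fuel + 1, left, right =>
    if left < right ∧ PySem.List.pyGet? l left = PySem.List.pyGet? l right then
      match PySem.List.pyGet? l left with
      | some c =>
          pvAOuter l fuel (pvALeft l c right (right + 1 - left).toNat left)
            (pvARight l c (pvALeft l c right (right + 1 - left).toNat left)
              (right + 1 - pvALeft l c right (right + 1 - left).toNat left).toNat right)
      | none => (left, right)  -- unreachable: 0 ≤ left < length at every check (Python would raise)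
    else (left, right)

def solution (s : String) : Option String :=
  let l := s.toList
  if l = [] then none
  else
    let p := pvAOuter l l.length 0 ((l.length : Int) - 1)
    if p.1 ≤ p.2 then
      some (String.ofList (PySem.List.slice l (some p.1) (some (p.2 + 1))))
    else none

-- ===== PORT B =====
-- run-length encoding loop of Source B
def pvRle (l : List Char) : List (Char × Int) :=
  l.foldl (fun runs ch =>
    match runs.getLast? with
    | some (c, n) => if c = ch then runs.dropLast ++ [(ch, n + 1)] else runs ++ [(ch, 1)]
    | none => runs ++ [(ch, 1)]) []

-- two-pointer loop of Source B over the run table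
def pvTwoPtr (runs : List (Char × Int)) : Nat → Int → Int → Int × Int
  | 0, i, j => (i, j)
  | fuel + 1, i, j =>
    if i < j ∧ (PySem.List.pyGet? runs i).map Prod.fst = (PySem.List.pyGet? runs j).map Prod.fst then
      pvTwoPtr runs fuel (i + 1) (j - 1)
    else (i, j)

def solution_alt (s : String) : Option String :=
  let l := s.toList
  if l = [] then none
  else
    let runs := pvRle l
    let p := pvTwoPtr runs runs.length 0 ((runs.length : Int) - 1)
    if p.2 < p.1 then none
    else if p.1 = p.2 then
      match PySem.List.pyGet? runs p.1 with
      | some (c, n) => if n = 1 then some (String.ofList [c]) else none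
      | none => none
    else
      some (String.ofList
        (((PySem.List.slice runs (some p.1) (some (p.2 + 1))).map
          (fun cn => List.replicate cn.2.toNat cn.1)).flatten))

-- ===== PRECONDITION & SPEC =====
def Spec_solution (s : String) (out : Option String) : Prop := out = solution_alt s
instance (s : String) (out : Option String) : Decidable (Spec_solution s out) := by unfold Spec_solution; infer_instance

-- ===== CLAIM (what is proved, stated in full; the proofs are below) =====
def Claim_equal_solution : Prop := ∀ (s : String), Dom_solution s → Spec_solution s (solution s)

-- ===== LEMMAS AND PROOFS =====

-- the common functional specification: repeatedly strip the equal end runs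
def pvTrim (c : Char) (l : List Char) : List Char :=
  ((l.dropWhile (· = c)).reverse.dropWhile (· = c)).reverse

theorem pvTrim_len_le (c : Char) (l : List Char) : (pvTrim c l).length ≤ (l.dropWhile (· = c)).length := by
  unfold pvTrim
  simpa using List.length_dropWhile_le (p := (· = c)) ((l.dropWhile (· = c)).reverse)

def pvCore : List Char → List Char
  | [] => []
  | c :: t =>
    if h : t ≠ [] ∧ (c :: t).getLast? = some c then pvCore (pvTrim c (c :: t)) else c :: t
termination_by l => l.length
decreasing_by
  have h1 := pvTrim_len_le c (c :: t)
  have h2 : ((c :: t).dropWhile (· = c)).length ≤ t.length := by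
    have : (c :: t).dropWhile (· = c) = t.dropWhile (· = c) := by
      simp [List.dropWhile_cons]
    rw [this]; exact List.length_dropWhile_le _ _
  simp only [List.length_cons]; omega

theorem pvCore_nil : pvCore [] = [] := by rw [pvCore]

theorem pvCore_of_short (l : List Char) (h : l.length ≤ 1) : pvCore l = l := by
  match l with
  | [] => rw [pvCore]
  | c :: t =>
    have ht : t = [] := by
      simp only [List.length_cons] at h
      exact List.eq_nil_of_length_eq_zero (by omega)
    subst ht
    rw [pvCore, dif_neg]; simp

theorem pvCore_of_ne (l : List Char) (h : l.getLast? ≠ l.head?) : pvCore l = l := by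
  match l with
  | [] => rw [pvCore]
  | c :: t =>
    rw [pvCore]
    rw [dif_neg]
    intro ⟨_, hlast⟩
    exact h (by simp [hlast])

theorem pvCore_step (l : List Char) (c : Char) (hh : l.head? = some c)
    (hl : l.getLast? = some c) (h2 : 2 ≤ l.length) :
    pvCore l = pvCore (pvTrim c l) := by
  match l with
  | [] => simp at hh
  | c' :: t =>
    have hc : c' = c := by simp at hh; exact hh
    subst hc
    rw [pvCore, dif_pos]
    constructor
    · intro ht; subst ht; simp at h2
    · exact hl

-- window notation: W l a k = the sublist of l from index a of length (at most) k
def pvW {α : Type} (l : List α) (a k : Nat) : List α := (l.drop a).take (k - a)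

-- dropWhile is a drop by the takeWhile length (general fact used to move between the two views)
theorem pvDropWhile_eq_drop {α : Type} (p : α → Bool) (l : List α) :
    l.dropWhile p = l.drop (l.takeWhile p).length := by
  nth_rewrite 3 [← List.takeWhile_append_dropWhile (p := p) (l := l)]
  rw [List.drop_left]

-- a nonempty window starts at l[a]
theorem pvW_cons {α : Type} (l : List α) (a b : Nat) (ha : a < l.length) (hab : a < b) :
    pvW l a b = l[a] :: pvW l (a + 1) b := by
  unfold pvW
  rw [List.drop_eq_getElem_cons ha]
  have e : b - a = (b - (a + 1)) + 1 := by omega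
  rw [e, List.take_succ_cons]

-- a window whose right end is in range ends with l[b-1]
theorem pvW_concat {α : Type} (l : List α) (a b : Nat) (hb : b ≤ l.length) (hab : a < b) :
    pvW l a b = pvW l a (b - 1) ++ [l[b - 1]'(by omega)] := by
  unfold pvW
  have e : b - a = ((b - 1) - a) + 1 := by omega
  rw [e, List.take_succ]
  congr 1
  have : (l.drop a)[(b - 1) - a]? = l[a + ((b - 1) - a)]? := List.getElem?_drop ..
  rw [this]
  have e2 : a + ((b - 1) - a) = b - 1 := by omega
  rw [e2, List.getElem?_eq_getElem (by omega)]
  rfl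

theorem pvW_length {α : Type} (l : List α) (a b : Nat) (hb : b ≤ l.length) :
    (pvW l a b).length = b - a := by
  unfold pvW
  rw [List.length_take, List.length_drop]
  omega

theorem pvW_drop {α : Type} (l : List α) (a b t : Nat) :
    (pvW l a b).drop t = pvW l (a + t) b := by
  unfold pvW
  rw [List.drop_take, List.drop_drop]
  congr 1
  omega

theorem pvW_take {α : Type} (l : List α) (a b k : Nat) (hk : k ≤ b - a) :
    (pvW l a b).take k = pvW l a (a + k) := by
  unfold pvW
  rw [List.take_take]
  congr 1
  omega

theorem pvALeft_spec (l : List Char) (c : Char) (right : Int) :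
    ∀ fuel : Nat, ∀ left : Int, 0 ≤ left → (right + 1 - left).toNat ≤ fuel →
      pvALeft l c right fuel left =
        left + ((pvW l left.toNat (right + 1).toNat).takeWhile (· = c)).length := by
  intro fuel
  induction fuel with
  | zero =>
    intro left h0 hf
    have hz : (right + 1).toNat - left.toNat = 0 := by omega
    simp only [pvALeft]
    unfold pvW
    rw [hz]
    simp
  | succ fuel ih =>
    intro left h0 hf
    by_cases h : left ≤ right ∧ PySem.List.pyGet? l left = some c
    · have h2 := h.2
      rw [PySem.List.pyGet?_of_nonneg l h0] at h2
      obtain ⟨hlt, heq⟩ := List.getElem?_eq_some_iff.mp h2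
      simp only [pvALeft]
      rw [if_pos h, ih (left + 1) (by omega) (by omega)]
      have e1 : (left + 1).toNat = left.toNat + 1 := by omega
      rw [e1, pvW_cons l left.toNat (right + 1).toNat hlt (by omega),
          List.takeWhile_cons_of_pos (by simp [heq])]
      simp only [List.length_cons]
      push_cast
      omega
    · simp only [pvALeft]
      rw [if_neg h]
      have hz : ((pvW l left.toNat (right + 1).toNat).takeWhile (· = c)).length = 0 := by
        rcases Decidable.em (left ≤ right) with hle | hle
        · have h2 : ¬ PySem.List.pyGet? l left = some c := fun hc => h ⟨hle, hc⟩
          rw [PySem.List.pyGet?_of_nonneg l h0] at h2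
          rcases Nat.lt_or_ge left.toNat l.length with hlt | hge
          · have heq : ¬ l[left.toNat] = c := by
              intro e
              exact h2 (by rw [List.getElem?_eq_getElem hlt, e])
            rw [pvW_cons l left.toNat (right + 1).toNat hlt (by omega),
                List.takeWhile_cons_of_neg (by simp [heq])]
            rfl
          · unfold pvW
            rw [List.drop_eq_nil_of_le hge]
            simp
        · have e0 : (right + 1).toNat - left.toNat = 0 := by omega
          unfold pvW
          rw [e0]
          simp
      omega

theorem pvARight_spec (l : List Char) (c : Char) (left : Int) (h0 : 0 ≤ left) :
    ∀ fuel : Nat, ∀ right : Int, right < (l.length : Int) → (right + 1 - left).toNat ≤ fuel →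
      pvARight l c left fuel right =
        right - ((pvW l left.toNat (right + 1).toNat).reverse.takeWhile (· = c)).length := by
  intro fuel
  induction fuel with
  | zero =>
    intro right hlen hf
    have hz : (right + 1).toNat - left.toNat = 0 := by omega
    simp only [pvARight]
    unfold pvW
    rw [hz]
    simp
  | succ fuel ih =>
    intro right hlen hf
    by_cases h : left ≤ right ∧ PySem.List.pyGet? l right = some c
    · have hr0 : 0 ≤ right := le_trans h0 h.1
      have h2 := h.2
      rw [PySem.List.pyGet?_of_nonneg l hr0] at h2
      obtain ⟨hlt, heq⟩ := List.getElem?_eq_some_iff.mp h2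
      simp only [pvARight]
      rw [if_pos h, ih (right - 1) (by omega) (by omega)]
      have e1 : (right + 1).toNat = right.toNat + 1 := by omega
      have e2 : (right - 1 + 1).toNat = right.toNat := by omega
      rw [e1, e2,
          pvW_concat l left.toNat (right.toNat + 1) (by omega) (by omega)]
      rw [List.reverse_concat]
      rw [List.takeWhile_cons_of_pos (by simp [heq])]
      simp only [List.length_cons]
      push_cast
      omega
    · simp only [pvARight]
      rw [if_neg h]
      have hz : ((pvW l left.toNat (right + 1).toNat).reverse.takeWhile (· = c)).length = 0 := by
        rcases Decidable.em (left ≤ right) with hle | hle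
        · have hr0 : 0 ≤ right := le_trans h0 hle
          have h2 : ¬ PySem.List.pyGet? l right = some c := fun hc => h ⟨hle, hc⟩
          rw [PySem.List.pyGet?_of_nonneg l hr0] at h2
          have hlt : right.toNat < l.length := by omega
          have e1 : (right + 1).toNat = right.toNat + 1 := by omega
          rw [e1, pvW_concat l left.toNat (right.toNat + 1) (by omega) (by omega),
              List.reverse_concat]
          have hne : ¬ l[right.toNat] = c := by
            intro e
            apply h2
            rw [List.getElem?_eq_getElem hlt, e]
          rw [List.takeWhile_cons_of_neg (by simp [hne])]
          rfl
        · have e0 : (right + 1).toNat - left.toNat = 0 := by omega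
          unfold pvW
          rw [e0]
          simp
      omega

theorem pvAOuter_spec (l : List Char) :
    ∀ fuel : Nat, ∀ left right : Int, 0 ≤ left → left ≤ right + 1 → right < (l.length : Int) →
      (right + 1 - left).toNat ≤ fuel →
      0 ≤ (pvAOuter l fuel left right).1 ∧
      (pvAOuter l fuel left right).1 ≤ (pvAOuter l fuel left right).2 + 1 ∧
      (pvAOuter l fuel left right).2 < (l.length : Int) ∧
      pvW l (pvAOuter l fuel left right).1.toNat ((pvAOuter l fuel left right).2 + 1).toNat =
        pvCore (pvW l left.toNat (right + 1).toNat) := by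
  intro fuel
  induction fuel with
  | zero =>
    intro left right h0 h01 hlen hf
    refine ⟨h0, h01, hlen, ?_⟩
    show pvW l left.toNat (right + 1).toNat = pvCore (pvW l left.toNat (right + 1).toNat)
    refine (pvCore_of_short _ ?_).symm
    unfold pvW
    rw [List.length_take, List.length_drop]
    omega
  | succ fuel ih =>
      intro left right h0 h01 hlen hf
      by_cases hcond : left < right ∧ PySem.List.pyGet? l left = PySem.List.pyGet? l right
      · have hlr := hcond.1
        have hr0 : 0 ≤ right := by omega
        have ha : left.toNat < l.length := by omega
        have hb : right.toNat < l.length := by omega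
        have hgl : PySem.List.pyGet? l left = some (l[left.toNat]) := by
          rw [PySem.List.pyGet?_of_nonneg l h0, List.getElem?_eq_getElem ha]
        simp only [pvAOuter]
        rw [if_pos hcond]
        split
        next c hc =>
          have heqa : l[left.toNat] = c := by
            rw [hgl] at hc
            exact Option.some_inj.mp hc
          have hgr : PySem.List.pyGet? l right = some c := by rw [← hcond.2, hc]
          have heqb : l[right.toNat] = c := by
            rw [PySem.List.pyGet?_of_nonneg l hr0, List.getElem?_eq_getElem hb] at hgr
            exact Option.some_inj.mp hgr
          set a := left.toNat with hadef
          set b := right.toNat with hbdef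
          have hab : a < b := by omega
          have hB1 : (right + 1).toNat = b + 1 := by omega
          set w := pvW l a (b + 1) with hwdef
          have hwlen : w.length = b + 1 - a := pvW_length l a (b + 1) (by omega)
          have hwcons : w = c :: pvW l (a + 1) (b + 1) := by
            rw [hwdef, pvW_cons l a (b + 1) ha (by omega), heqa]
          have hwconcat : w = pvW l a b ++ [c] := by
            rw [hwdef, pvW_concat l a (b + 1) (by omega) (by omega)]
            simp only [Nat.add_sub_cancel]
            rw [show l[b]'(by omega) = c from heqb]
          have hLspec := pvALeft_spec l c right (right + 1 - left).toNat left h0 (le_refl _)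
          rw [hB1] at hLspec
          set t := ((pvW l a (b + 1)).takeWhile (· = c)).length with htdef
          set L := pvALeft l c right (right + 1 - left).toNat left with hLdef
          have ht_le : t ≤ b + 1 - a := by
            rw [htdef]
            calc ((pvW l a (b + 1)).takeWhile (· = c)).length
                ≤ (pvW l a (b + 1)).length := (List.takeWhile_prefix _).length_le
              _ = b + 1 - a := hwlen
          have hL : L = left + (t : Int) := hLspec
          have ht1 : 1 ≤ t := by
            rw [htdef, ← hwdef, hwcons, List.takeWhile_cons_of_pos (by simp)]
            simp
          have hLgt : left < L := by omega
          have hL0 : 0 ≤ L := by omega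
          have hLtoNat : L.toNat = a + t := by omega
          have hw2eq : w.dropWhile (· = c) = pvW l (a + t) (b + 1) := by
            rw [pvDropWhile_eq_drop, ← htdef, hwdef, pvW_drop]
          set w2 := w.dropWhile (· = c) with hw2def
          have hw2' : pvW l L.toNat (right + 1).toNat = w2 := by
            rw [hB1, hLtoNat, hw2eq]
          have hw2len : w2.length = (b + 1 - a) - t := by
            rw [hw2def, pvDropWhile_eq_drop, ← htdef, List.length_drop, hwlen]
          have hRspec := pvARight_spec l c L hL0 (right + 1 - L).toNat right hlen (le_refl _)
          rw [hw2'] at hRspec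
          set u := (w2.reverse.takeWhile (· = c)).length with hudef
          have hu_le : u ≤ w2.length := by
            rw [hudef]
            calc (w2.reverse.takeWhile (· = c)).length
                ≤ w2.reverse.length := (List.takeWhile_prefix _).length_le
              _ = w2.length := List.length_reverse ..
          set R := pvARight l c L (right + 1 - L).toNat right with hRdef
          have hR : R = right - (u : Int) := hRspec
          have hRle : R ≤ right := by omega
          have hLR : L ≤ R + 1 := by omega
          have hw3 : pvW l L.toNat (R + 1).toNat = pvTrim c w := by
            have hRN : (R + 1).toNat = (b + 1) - u := by omega
            rw [hLtoNat, hRN]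
            unfold pvTrim
            rw [show w2.reverse.dropWhile (· = c) = w2.reverse.drop u from by
                  rw [pvDropWhile_eq_drop, ← hudef]]
            have hplen : (pvW l (a + t) (b + 1)).length = (b + 1) - (a + t) :=
              pvW_length l (a + t) (b + 1) (by omega)
            rw [List.drop_reverse, List.reverse_reverse, hw2eq,
                pvW_take l (a + t) (b + 1) _ (by omega)]
            congr 1
            rw [hw2eq, hplen] at hu_le
            omega
          have hcore : pvCore w = pvCore (pvTrim c w) := by
            apply pvCore_step w c
            · rw [hwcons]; rfl
            · rw [hwconcat]; exact List.getLast?_concat ..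
            · omega
          obtain ⟨i1, i2, i3, i4⟩ := ih L R hL0 hLR (by omega) (by omega)
          refine ⟨i1, i2, i3, ?_⟩
          rw [i4, hw3, hB1, ← hwdef]
          exact hcore.symm
        next hc =>
          exfalso
          rw [hgl] at hc
          cases hc
      · simp only [pvAOuter]
        rw [if_neg hcond]
        refine ⟨h0, by exact h01, hlen, ?_⟩
        show pvW l left.toNat (right + 1).toNat = pvCore (pvW l left.toNat (right + 1).toNat)
        by_cases hlr : left < right
        · have hr0 : 0 ≤ right := by omega
          have ha : left.toNat < l.length := by omega
          have hb : right.toNat < l.length := by omega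
          have hne : ¬ l[left.toNat] = l[right.toNat] := by
            intro e
            apply hcond
            refine ⟨hlr, ?_⟩
            rw [PySem.List.pyGet?_of_nonneg l h0, PySem.List.pyGet?_of_nonneg l hr0,
                List.getElem?_eq_getElem ha, List.getElem?_eq_getElem hb, e]
          have hB1 : (right + 1).toNat = right.toNat + 1 := by omega
          rw [hB1]
          refine (pvCore_of_ne _ ?_).symm
          have hh : (pvW l left.toNat (right.toNat + 1)).head? = some (l[left.toNat]) := by
            rw [pvW_cons l left.toNat (right.toNat + 1) ha (by omega)]
            rfl
          have hl2 : (pvW l left.toNat (right.toNat + 1)).getLast? = some (l[right.toNat]) := by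
            rw [pvW_concat l left.toNat (right.toNat + 1) (by omega) (by omega)]
            simp only [Nat.add_sub_cancel]
            exact List.getLast?_concat ..
          rw [hh, hl2]
          intro e
          exact hne (Option.some_inj.mp e).symm
        · refine (pvCore_of_short _ ?_).symm
          unfold pvW
          rw [List.length_take, List.length_drop]
          omega

-- canonical description of both programs
def pvCanon (s : String) : Option String :=
  if s.toList = [] then none
  else if pvCore s.toList = [] then none
  else some (String.ofList (pvCore s.toList))

theorem solution_eq_canon (s : String) : solution s = pvCanon s := by
  simp only [solution, pvCanon]
  by_cases hnil : s.toList = []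
  · rw [if_pos hnil, if_pos hnil]
  · rw [if_neg hnil, if_neg hnil]
    have hlen : 1 ≤ s.toList.length := by
      cases h : s.toList with
      | nil => exact absurd h hnil
      | cons a t => simp
    obtain ⟨hp0, hp1, hp2, hw⟩ :=
      pvAOuter_spec s.toList s.toList.length 0 ((s.toList.length : Int) - 1)
        (by omega) (by omega) (by omega) (by omega)
    have hinit : pvW s.toList (0 : Int).toNat (((s.toList.length : Int) - 1) + 1).toNat
        = s.toList := by
      have e1 : (((s.toList.length : Int) - 1) + 1).toNat = s.toList.length := by omega
      have e2 : (0 : Int).toNat = 0 := rfl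
      rw [e1, e2]
      unfold pvW
      simp
    rw [hinit] at hw
    set l := s.toList with hldef
    set p := pvAOuter l l.length 0 ((l.length : Int) - 1) with hpdef
    have hwlen : (pvW l p.1.toNat (p.2 + 1).toNat).length = (p.2 + 1).toNat - p.1.toNat :=
      pvW_length l _ _ (by omega)
    by_cases hle : p.1 ≤ p.2
    · rw [if_pos hle]
      have hne : ¬ pvCore l = [] := by
        rw [← hw]
        intro e
        have hlc := congrArg List.length e
        rw [hwlen] at hlc
        simp only [List.length_nil] at hlc
        omega
      rw [if_neg hne]
      rw [PySem.List.slice_toNat l hp0 (by omega)]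
      exact congrArg (fun x => some (String.ofList x)) hw
    · rw [if_neg hle]
      have he : pvCore l = [] := by
        rw [← hw]
        apply List.eq_nil_iff_length_eq_zero.mpr
        rw [hwlen]
        omega
      rw [if_pos he]

-- ==== B side ====
def pvF (rs : List (Char × Int)) : List Char :=
  (rs.map (fun p => List.replicate p.2.toNat p.1)).flatten

def pvGood (rs : List (Char × Int)) : Prop :=
  List.IsChain (fun p q => p.1 ≠ q.1) rs ∧ ∀ p ∈ rs, 1 ≤ p.2

theorem pvF_cons (x : Char × Int) (ys : List (Char × Int)) :
    pvF (x :: ys) = List.replicate x.2.toNat x.1 ++ pvF ys := by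
  simp [pvF]

theorem pvF_append (xs ys : List (Char × Int)) : pvF (xs ++ ys) = pvF xs ++ pvF ys := by
  simp [pvF]

theorem pvF_cons_head (x : Char × Int) (ys : List (Char × Int)) (h : 1 ≤ x.2) :
    pvF (x :: ys) = x.1 :: (List.replicate (x.2.toNat - 1) x.1 ++ pvF ys) := by
  rw [pvF_cons]
  obtain ⟨k, hk⟩ : ∃ k, x.2.toNat = k + 1 := ⟨x.2.toNat - 1, by omega⟩
  rw [hk, List.replicate_succ, List.cons_append]
  simp

theorem pvF_concat_last (xs : List (Char × Int)) (x : Char × Int) (h : 1 ≤ x.2) :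
    (pvF (xs ++ [x])).getLast? = some x.1 := by
  rw [pvF_append]
  have e : x.2.toNat = (x.2.toNat - 1) + 1 := by omega
  rw [show pvF [x] = List.replicate x.2.toNat x.1 from by simp [pvF], e,
      List.replicate_succ', ← List.append_assoc]
  exact List.getLast?_concat ..

theorem pvRle_spec (l : List Char) : pvF (pvRle l) = l ∧ pvGood (pvRle l) := by
  induction l using List.reverseRecOn with
  | nil => exact ⟨rfl, by simp [pvRle, pvGood]⟩
  | append_singleton l ch ih =>
    have ihF := ih.1
    have ihC := ih.2.1
    have ihN := ih.2.2
    have hstep : pvRle (l ++ [ch]) = (match (pvRle l).getLast? with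
        | some (c, n) =>
          if c = ch then (pvRle l).dropLast ++ [(ch, n + 1)] else (pvRle l) ++ [(ch, 1)]
        | none => (pvRle l) ++ [(ch, 1)]) := by
      simp [pvRle, List.foldl_append]
    rcases hlast : (pvRle l).getLast? with _ | ⟨c, n⟩
    · have hstep2 : pvRle (l ++ [ch]) = pvRle l ++ [(ch, 1)] := by rw [hstep, hlast]
      have hre : pvRle l = [] := List.getLast?_eq_none_iff.mp hlast
      rw [hre] at ihF
      have hl : l = [] := by rw [← ihF]; rfl
      subst hl
      rw [hstep2, hre]
      refine ⟨by simp [pvF], by simp, ?_⟩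
      intro p hp
      simp at hp
      subst hp
      norm_num
    · have hstep2 : pvRle (l ++ [ch]) =
          if c = ch then (pvRle l).dropLast ++ [(ch, n + 1)] else pvRle l ++ [(ch, 1)] := by
        rw [hstep, hlast]
      rw [hstep2]
      obtain ⟨front, hfr⟩ := List.getLast?_eq_some_iff.mp hlast
      have hn1 : 1 ≤ n := ihN (c, n) (by rw [hfr]; simp)
      by_cases hc : c = ch
      · subst hc
        rw [if_pos rfl]
        rw [hfr, List.dropLast_concat]
        refine ⟨?_, ?_, ?_⟩
        · rw [pvF_append]
          have e : (n + 1).toNat = n.toNat + 1 := by omega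
          rw [show pvF [(c, n + 1)] = List.replicate (n + 1).toNat c from by simp [pvF], e,
              List.replicate_succ', ← List.append_assoc]
          rw [hfr, pvF_append] at ihF
          rw [show pvF [(c, n)] = List.replicate n.toNat c from by simp [pvF]] at ihF
          rw [ihF]
        · rw [hfr] at ihC
          obtain ⟨c1, c2, hrel⟩ := List.isChain_append.mp ihC
          refine List.isChain_append.mpr ⟨c1, by simp, ?_⟩
          intro x hx y hy
          simp at hy
          subst hy
          exact hrel x hx (c, n) (by simp)
        · intro p hp
          rcases List.mem_append.mp hp with hp | hp
          · exact ihN p (by rw [hfr]; exact List.mem_append.mpr (Or.inl hp))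
          · simp at hp
            subst hp
            omega
      · rw [if_neg hc]
        refine ⟨?_, ?_, ?_⟩
        · rw [pvF_append, ihF]
          simp [pvF]
        · refine List.isChain_append.mpr ⟨ihC, by simp, ?_⟩
          intro x hx y hy
          simp at hy
          subst hy
          rw [hfr, List.getLast?_concat] at hx
          simp at hx
          subst hx
          simpa using hc
        · intro p hp
          rcases List.mem_append.mp hp with hp | hp
          · exact ihN p hp
          · simp at hp
            subst hp
            norm_num

def pvRcore (rs : List (Char × Int)) : List (Char × Int) :=
  if h : 2 ≤ rs.length ∧ rs.getLast?.map Prod.fst = rs.head?.map Prod.fst then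
    pvRcore rs.tail.dropLast
  else rs
termination_by rs.length
decreasing_by
  have : rs.tail.dropLast.length = rs.length - 1 - 1 := by simp
  omega

theorem pvRcore_stop (rs : List (Char × Int)) :
    ¬ (2 ≤ (pvRcore rs).length ∧
       (pvRcore rs).getLast?.map Prod.fst = (pvRcore rs).head?.map Prod.fst) := by
  fun_induction pvRcore rs with
  | case1 rs h ih => exact ih
  | case2 rs h => exact h

theorem pvTwoPtr_spec (rs : List (Char × Int)) :
    ∀ fuel : Nat, ∀ i j : Int, 0 ≤ i → i ≤ j + 1 → j < (rs.length : Int) →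
      (j - i).toNat ≤ fuel →
      0 ≤ (pvTwoPtr rs fuel i j).1 ∧
      (pvTwoPtr rs fuel i j).1 ≤ (pvTwoPtr rs fuel i j).2 + 1 ∧
      (pvTwoPtr rs fuel i j).2 < (rs.length : Int) ∧
      pvW rs (pvTwoPtr rs fuel i j).1.toNat ((pvTwoPtr rs fuel i j).2 + 1).toNat =
        pvRcore (pvW rs i.toNat (j + 1).toNat) := by
  intro fuel
  induction fuel with
  | zero =>
    intro i j h0 h01 hlen hf
    refine ⟨h0, h01, hlen, ?_⟩
    show pvW rs i.toNat (j + 1).toNat = pvRcore (pvW rs i.toNat (j + 1).toNat)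
    rw [pvRcore, dif_neg]
    intro ⟨h2l, _⟩
    have hsh : (pvW rs i.toNat (j + 1).toNat).length ≤ 1 := by
      unfold pvW
      rw [List.length_take, List.length_drop]
      omega
    omega
  | succ fuel ih =>
      intro i j h0 h01 hlen hf
      by_cases hcond : i < j ∧
          (PySem.List.pyGet? rs i).map Prod.fst = (PySem.List.pyGet? rs j).map Prod.fst
      · have hij := hcond.1
        have hj0 : 0 ≤ j := by omega
        have ha : i.toNat < rs.length := by omega
        have hb : j.toNat < rs.length := by omega
        have hfst : rs[i.toNat].1 = rs[j.toNat].1 := by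
          have h2 := hcond.2
          rw [PySem.List.pyGet?_of_nonneg rs h0, PySem.List.pyGet?_of_nonneg rs hj0,
              List.getElem?_eq_getElem ha, List.getElem?_eq_getElem hb] at h2
          simpa using h2
        set a := i.toNat with hadef
        set b := j.toNat with hbdef
        have hab : a < b := by omega
        have hB1 : (j + 1).toNat = b + 1 := by omega
        simp only [pvTwoPtr]
        rw [if_pos hcond, hB1]
        set w := pvW rs a (b + 1) with hwdef
        have hwlen : w.length = b + 1 - a := pvW_length rs a (b + 1) (by omega)
        have hwcons : w = rs[a] :: pvW rs (a + 1) (b + 1) := by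
          rw [hwdef, pvW_cons rs a (b + 1) ha (by omega)]
        have hwconcat : w = pvW rs a b ++ [rs[b]] := by
          rw [hwdef, pvW_concat rs a (b + 1) (by omega) (by omega)]
          simp
        have hhead : w.head? = some rs[a] := by rw [hwcons]; rfl
        have hlast2 : w.getLast? = some rs[b] := by
          rw [hwconcat]
          exact List.getLast?_concat ..
        have hrstep : pvRcore w = pvRcore w.tail.dropLast := by
          rw [pvRcore, dif_pos]
          refine ⟨by omega, ?_⟩
          rw [hhead, hlast2]
          simp only [Option.map_some]
          exact congrArg some hfst.symm
        have htd : w.tail.dropLast = pvW rs (a + 1) b := by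
          rw [hwcons, List.tail_cons, List.dropLast_eq_take,
              pvW_length rs (a + 1) (b + 1) (by omega),
              pvW_take rs (a + 1) (b + 1) _ (by omega)]
          congr 1
          omega
        have hnext : pvW rs (i + 1).toNat ((j - 1) + 1).toNat = pvW rs (a + 1) b := by
          have e1 : (i + 1).toNat = a + 1 := by omega
          have e2 : ((j - 1) + 1).toNat = b := by omega
          rw [e1, e2]
        obtain ⟨i1, i2, i3, i4⟩ := ih (i + 1) (j - 1) (by omega) (by omega) (by omega) (by omega)
        refine ⟨i1, i2, i3, ?_⟩
        rw [i4, hnext, ← htd, ← hrstep]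
      · simp only [pvTwoPtr]
        rw [if_neg hcond]
        refine ⟨h0, h01, hlen, ?_⟩
        show pvW rs i.toNat (j + 1).toNat = pvRcore (pvW rs i.toNat (j + 1).toNat)
        by_cases hij : i < j
        · have hj0 : 0 ≤ j := by omega
          have ha : i.toNat < rs.length := by omega
          have hb : j.toNat < rs.length := by omega
          have hne : ¬ rs[i.toNat].1 = rs[j.toNat].1 := by
            intro e
            apply hcond
            refine ⟨hij, ?_⟩
            rw [PySem.List.pyGet?_of_nonneg rs h0, PySem.List.pyGet?_of_nonneg rs hj0,
                List.getElem?_eq_getElem ha, List.getElem?_eq_getElem hb]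
            simpa using e
          have hB1 : (j + 1).toNat = j.toNat + 1 := by omega
          rw [hB1]
          have hhead : (pvW rs i.toNat (j.toNat + 1)).head? = some rs[i.toNat] := by
            rw [pvW_cons rs i.toNat (j.toNat + 1) ha (by omega)]
            rfl
          have hlast2 : (pvW rs i.toNat (j.toNat + 1)).getLast? = some (rs[j.toNat]) := by
            rw [pvW_concat rs i.toNat (j.toNat + 1) (by omega) (by omega)]
            simp only [Nat.add_sub_cancel]
            exact List.getLast?_concat ..
          rw [pvRcore, dif_neg]
          intro ⟨_, hmap⟩
          rw [hhead, hlast2] at hmap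
          simp at hmap
          exact hne hmap.symm
        · rw [pvRcore, dif_neg]
          intro ⟨h2l, _⟩
          have : (pvW rs i.toNat (j + 1).toNat).length ≤ 1 := by
            unfold pvW
            rw [List.length_take, List.length_drop]
            omega
          omega

theorem pvDropWhile_replicate (c : Char) (k : Nat) (xs : List Char) :
    List.dropWhile (· = c) (List.replicate k c ++ xs) = List.dropWhile (· = c) xs := by
  induction k with
  | zero => rfl
  | succ k ih =>
    rw [List.replicate_succ, List.cons_append, List.dropWhile_cons_of_pos (by simp)]
    exact ih

theorem pvCore_replicate (c : Char) (k : Nat) (h2 : 2 ≤ k) :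
    pvCore (List.replicate k c) = [] := by
  have hrep : List.replicate k c = c :: List.replicate (k - 1) c := by
    rw [← List.replicate_succ]
    congr 1
    omega
  have hrep' : List.replicate k c = List.replicate (k - 1) c ++ [c] := by
    rw [← List.replicate_succ']
    congr 1
    omega
  have hstep := pvCore_step (List.replicate k c) c
    (by rw [hrep]; rfl) (by rw [hrep']; exact List.getLast?_concat ..) (by simpa using h2)
  rw [hstep]
  have hdw : List.dropWhile (· = c) (List.replicate k c) = [] := by
    have h := pvDropWhile_replicate c k []
    simpa using h
  unfold pvTrim
  rw [hdw]
  simp [pvCore_nil]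

theorem pvCore_rcore (rs : List (Char × Int)) (hg : pvGood rs) :
    pvCore (pvF rs) = pvCore (pvF (pvRcore rs)) ∧ pvGood (pvRcore rs) := by
  have key : ∀ n : Nat, ∀ rs : List (Char × Int), rs.length = n → pvGood rs →
      pvCore (pvF rs) = pvCore (pvF (pvRcore rs)) ∧ pvGood (pvRcore rs) := by
    intro n
    induction n using Nat.strong_induction_on with
    | _ n ih =>
      intro rs hn hg
      by_cases hcond : 2 ≤ rs.length ∧ rs.getLast?.map Prod.fst = rs.head?.map Prod.fst
      · have hstep : pvRcore rs = pvRcore rs.tail.dropLast := by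
          rw [pvRcore, dif_pos hcond]
        obtain ⟨p, t, rfl⟩ : ∃ p t, rs = p :: t := by
          cases rs with
          | nil => simp at hcond
          | cons p t => exact ⟨p, t, rfl⟩
        have ht : t ≠ [] := by
          intro e
          subst e
          simp at hcond
        obtain ⟨mid, q, rfl⟩ : ∃ mid q, t = mid ++ [q] :=
          ⟨t.dropLast, t.getLast ht, (List.dropLast_concat_getLast ht).symm⟩
        have hlastq : (p :: (mid ++ [q])).getLast? = some q := by
          rw [← List.cons_append]
          exact List.getLast?_concat ..
        have hq1 : q.1 = p.1 := by
          have h2 := hcond.2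
          rw [hlastq] at h2
          simpa using h2
        have hchain := hg.1
        rw [← List.cons_append, List.isChain_append] at hchain
        obtain ⟨hcpm, _, hrel⟩ := hchain
        have hmid_ne : mid ≠ [] := by
          intro e
          subst e
          have h := hrel p (by simp) q (by simp)
          exact h hq1.symm
        have hcm : List.IsChain (fun p q => p.1 ≠ q.1) mid := (List.isChain_cons.mp hcpm).2
        obtain ⟨m0, mt, rfl⟩ : ∃ m0 mt, mid = m0 :: mt := by
          cases mid with
          | nil => exact absurd rfl hmid_ne
          | cons m0 mt => exact ⟨m0, mt, rfl⟩
        have hm0 : p.1 ≠ m0.1 := (List.isChain_cons.mp hcpm).1 m0 rfl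
        obtain ⟨mf, ml, hmid2⟩ : ∃ mf ml, (m0 :: mt : List (Char × Int)) = mf ++ [ml] :=
          ⟨_, _, (List.dropLast_concat_getLast (by simp)).symm⟩
        have hpl : (p :: (m0 :: mt)).getLast? = some ml := by
          rw [hmid2]
          show ((p :: mf) ++ [ml]).getLast? = some ml
          exact List.getLast?_concat ..
        have hml : ml.1 ≠ q.1 := hrel ml (by rw [hpl]; rfl) q rfl
        have hnp : 1 ≤ p.2 := hg.2 p (by simp)
        have hnq : 1 ≤ q.2 := hg.2 q (by simp)
        have hnm0 : 1 ≤ m0.2 := hg.2 m0 (by simp)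
        have hmlmem : ml ∈ (m0 :: mt : List (Char × Int)) := by
          rw [hmid2]
          exact List.mem_append_right _ (by simp)
        have hnml : 1 ≤ ml.2 :=
          hg.2 ml (List.mem_cons_of_mem p (List.mem_append_left _ hmlmem))
        set c := p.1 with hcdef
        have hFrs : pvF (p :: ((m0 :: mt) ++ [q])) =
            List.replicate p.2.toNat c ++ (pvF (m0 :: mt) ++ List.replicate q.2.toNat c) := by
          rw [pvF_cons, pvF_append]
          simp [pvF, hq1, hcdef]
        have hFhead : (pvF (p :: ((m0 :: mt) ++ [q]))).head? = some c := by
          rw [pvF_cons_head _ _ hnp]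
          rfl
        have hFlast : (pvF (p :: ((m0 :: mt) ++ [q]))).getLast? = some c := by
          rw [show p :: ((m0 :: mt) ++ [q]) = (p :: (m0 :: mt)) ++ [q] from rfl]
          rw [pvF_concat_last _ q hnq, hq1]
        have hFlen : 2 ≤ (pvF (p :: ((m0 :: mt) ++ [q]))).length := by
          rw [hFrs]
          simp only [List.length_append, List.length_replicate]
          omega
        have hstep2 := pvCore_step _ c hFhead hFlast hFlen
        have hd1 : List.dropWhile (· = c) (pvF (m0 :: mt) ++ List.replicate q.2.toNat c) =
            pvF (m0 :: mt) ++ List.replicate q.2.toNat c := by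
          rw [pvF_cons_head m0 mt hnm0, List.cons_append]
          exact List.dropWhile_cons_of_neg
            (by simp only [decide_eq_true_eq]; exact fun e => hm0 e.symm)
        have hrev : (pvF (m0 :: mt)).reverse =
            ml.1 :: (List.replicate (ml.2.toNat - 1) ml.1 ++ (pvF mf).reverse) := by
          rw [hmid2, pvF_append,
              show pvF [ml] = List.replicate ml.2.toNat ml.1 from by simp [pvF],
              List.reverse_append, List.reverse_replicate,
              show ml.2.toNat = (ml.2.toNat - 1) + 1 from by omega,
              List.replicate_succ, List.cons_append]
          simp
        have htrim : pvTrim c (pvF (p :: ((m0 :: mt) ++ [q]))) = pvF (m0 :: mt) := by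
          unfold pvTrim
          rw [hFrs, pvDropWhile_replicate, hd1, List.reverse_append, List.reverse_replicate,
              pvDropWhile_replicate, hrev,
              List.dropWhile_cons_of_neg
                (by simp only [decide_eq_true_eq]; exact fun e => hml (e.trans hq1.symm)),
              ← hrev, List.reverse_reverse]
        have hctd : (p :: ((m0 :: mt) ++ [q])).tail.dropLast = (m0 :: mt : List (Char × Int)) := by
          rw [List.tail_cons, List.dropLast_concat]
        have hgood_mid : pvGood (m0 :: mt) :=
          ⟨hcm, fun x hx => hg.2 x (List.mem_cons_of_mem p (List.mem_append_left _ hx))⟩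
        have hlt : (m0 :: mt : List (Char × Int)).length < n := by
          simp only [List.length_cons, List.length_append, List.length_nil] at hn ⊢
          omega
        obtain ⟨ihEq, ihGood⟩ := ih (m0 :: mt).length hlt (m0 :: mt) rfl hgood_mid
        refine ⟨?_, ?_⟩
        · rw [hstep2, htrim, ihEq, hstep, hctd]
        · rw [hstep, hctd]
          exact ihGood
      · have hstop : pvRcore rs = rs := by rw [pvRcore, dif_neg hcond]
        rw [hstop]
        exact ⟨rfl, hg⟩
  exact key rs.length rs rfl hg

theorem solution_alt_eq_canon (s : String) : solution_alt s = pvCanon s := by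
  simp only [solution_alt, pvCanon]
  by_cases hnil : s.toList = []
  · rw [if_pos hnil, if_pos hnil]
  · rw [if_neg hnil, if_neg hnil]
    obtain ⟨hF, hGood⟩ := pvRle_spec s.toList
    set l := s.toList with hldef
    set rs := pvRle l with hrsdef
    have hrs_ne : rs ≠ [] := by
      intro e
      apply hnil
      rw [← hF, e]
      rfl
    have hlen1 : 1 ≤ rs.length := by
      cases h : rs with
      | nil => exact absurd h hrs_ne
      | cons a t => simp [h]
    obtain ⟨hp0, hp1, hp2, hw⟩ :=
      pvTwoPtr_spec rs rs.length 0 ((rs.length : Int) - 1) (by omega) (by omega) (by omega)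
        (by omega)
    have hinit : pvW rs (0 : Int).toNat (((rs.length : Int) - 1) + 1).toNat = rs := by
      have e1 : (((rs.length : Int) - 1) + 1).toNat = rs.length := by omega
      rw [e1, show (0 : Int).toNat = 0 from rfl]
      unfold pvW
      simp
    rw [hinit] at hw
    set p := pvTwoPtr rs rs.length 0 ((rs.length : Int) - 1) with hpdef
    obtain ⟨hcr, hGood'⟩ := pvCore_rcore rs hGood
    have hwlen : (pvW rs p.1.toNat (p.2 + 1).toNat).length = (p.2 + 1).toNat - p.1.toNat :=
      pvW_length rs _ _ (by omega)
    by_cases hlt : p.2 < p.1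
    · rw [if_pos hlt]
      have he : pvRcore rs = [] := by
        rw [← hw]
        apply List.eq_nil_iff_length_eq_zero.mpr
        rw [hwlen]
        omega
      have hc0 : pvCore l = [] := by
        rw [← hF, hcr, he, show pvF [] = [] from rfl, pvCore_nil]
      rw [if_pos hc0]
    · rw [if_neg hlt]
      by_cases heq : p.1 = p.2
      · rw [if_pos heq]
        have hi : p.1.toNat < rs.length := by omega
        have hone : pvRcore rs = [rs[p.1.toNat]] := by
          rw [← hw, pvW_cons rs p.1.toNat (p.2 + 1).toNat hi (by omega)]
          have hz : (p.2 + 1).toNat - (p.1.toNat + 1) = 0 := by omega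
          unfold pvW
          rw [hz]
          rfl
        have hget : PySem.List.pyGet? rs p.1 = some (rs[p.1.toNat]) := by
          rw [PySem.List.pyGet?_of_nonneg rs hp0, List.getElem?_eq_getElem hi]
        rcases hx : rs[p.1.toNat] with ⟨c, n⟩
        rw [hx] at hone hget
        rw [hget]
        have hn1 : 1 ≤ n := by
          have hm : (c, n) ∈ rs := hx ▸ List.getElem_mem hi
          exact hGood.2 (c, n) hm
        show (if n = 1 then some (String.ofList [c]) else none) = _
        by_cases hn : n = 1
        · rw [if_pos hn]
          subst hn
          have hc1 : pvCore l = [c] := by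
            rw [← hF, hcr, hone, show pvF [(c, (1 : Int))] = [c] from by simp [pvF]]
            exact pvCore_of_short [c] (by simp)
          rw [if_neg (by rw [hc1]; simp), hc1]
        · rw [if_neg hn]
          have hc0 : pvCore l = [] := by
            rw [← hF, hcr, hone, show pvF [(c, n)] = List.replicate n.toNat c from by simp [pvF]]
            exact pvCore_replicate c n.toNat (by omega)
          rw [if_pos hc0]
      · rw [if_neg heq]
        have h12 : p.1 < p.2 := by omega
        set rs' := pvRcore rs with hrs'def
        have hlen' : rs'.length = (p.2 + 1).toNat - p.1.toNat := by
          rw [← hw, hwlen]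
        have h2le : 2 ≤ rs'.length := by omega
        obtain ⟨r0, rt, hr0⟩ : ∃ r0 rt, rs' = r0 :: rt := by
          cases h : rs' with
          | nil => rw [h] at h2le; simp at h2le
          | cons r0 rt => exact ⟨r0, rt, rfl⟩
        have hrs'ne : rs' ≠ [] := by rw [hr0]; simp
        obtain ⟨rf, rl, hrl⟩ : ∃ rf rl, rs' = rf ++ [rl] :=
          ⟨_, _, (List.dropLast_concat_getLast hrs'ne).symm⟩
        have hstop := pvRcore_stop rs
        have hh : rs'.head? = some r0 := by rw [hr0]; rfl
        have hg2 : rs'.getLast? = some rl := by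
          rw [hrl]
          exact List.getLast?_concat ..
        have hne2 : ¬ rl.1 = r0.1 := by
          intro e
          apply hstop
          refine ⟨h2le, ?_⟩
          rw [hh, hg2]
          simp [e]
        have hn0 : 1 ≤ r0.2 := hGood'.2 r0 (by rw [hr0]; simp)
        have hnl : 1 ≤ rl.2 := hGood'.2 rl (by rw [hrl]; simp)
        have hFhead : (pvF rs').head? = some r0.1 := by
          rw [hr0, pvF_cons_head r0 rt hn0]
          rfl
        have hFlast : (pvF rs').getLast? = some rl.1 := by
          rw [hrl]
          exact pvF_concat_last rf rl hnl
        have hcl : pvCore l = pvF rs' := by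
          rw [← hF, hcr]
          apply pvCore_of_ne
          rw [hFhead, hFlast]
          simp [hne2]
        have hFne : pvF rs' ≠ [] := by
          rw [hr0, pvF_cons_head r0 rt hn0]
          simp
        rw [if_neg (by rw [hcl]; exact hFne)]
        rw [PySem.List.slice_toNat rs hp0 (by omega)]
        have hslice : (rs.drop p.1.toNat).take ((p.2 + 1).toNat - p.1.toNat) = rs' := hw
        rw [hslice, hcl]
        rfl

-- ===== VERDICT (by name: the statement is the Claim_ definition above) =====
theorem solution_spec : Claim_equal_solution := by
  intro s _
  unfold Spec_solution
  rw [solution_eq_canon, solution_alt_eq_canon]
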